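-- pv_equiv track=rewrite | github.com/yhann0827/multimodal-chatbot | app.py | prepare_messages_for_model
-- ===== SOURCE A (Python) =====
-- def prepare_messages_for_model(model_choice, messages):
--     if model_choice=="Llama":
--         converted_messages = []
--         last_role = None
--
--         for msg in messages:
--             current_role = msg['role']
--             content = msg['content']
--
--             if current_role == 'system':
--                 if not converted_messages:
--                     converted_messages.append({
--                         'role': 'user',
--                         'content': content
--                     })
--                     last_role = 'user'
--                 continue
--
--             if last_role is None:
--                 converted_messages.append({
--                     'role': 'user' if current_role == 'user' else 'assistant',
--                     'content': content
--                 })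
--             elif last_role == 'user' and current_role == 'user':
--                 converted_messages[-1]['content'] += "\n\n" + content
--             elif last_role == 'assistant' and current_role == 'assistant':
--                 converted_messages[-1]['content'] += "\n\n" + content
--             else:
--                 converted_messages.append({
--                     'role': current_role,
--                     'content': content
--                 })
--
--             last_role = converted_messages[-1]['role']
--
--         if converted_messages and converted_messages[-1]['role'] == 'assistant':
--             converted_messages.pop()
--
--         return converted_messages
--     return messages
-- ===== SOURCE B (Python) =====
-- from itertools import groupby
--
--
-- def prepare_messages_for_model(model_choice, messages):
--     if model_choice != "Llama":
--         return messages
--     # pass 1: clean — drop systems (a leading one becomes a 'user' entry),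
--     # normalize only the first emitted entry's role to user/assistant.
--     cleaned = []
--     for msg in messages:
--         role, content = msg['role'], msg['content']
--         if role == 'system':
--             if not cleaned:
--                 cleaned.append(('user', content))
--         else:
--             if not cleaned:
--                 role = 'user' if role == 'user' else 'assistant'
--             cleaned.append((role, content))
--     # pass 2: collapse consecutive equal-role runs; only user/assistant runs merge.
--     out = []
--     for role, run in groupby(cleaned, key=lambda rc: rc[0]):
--         contents = [c for _, c in run]
--         if role in ('user', 'assistant'):
--             out.append({'role': role, 'content': '\n\n'.join(contents)})
--         else:
--             out.extend({'role': role, 'content': c} for c in contents)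
--     if out and out[-1]['role'] == 'assistant':
--         out.pop()
--     return out
-- ===== Notes on version B (the rewrite author's own statement) =====
-- stated objective: alternative
-- what changed: B replaces A's single stateful loop (last_role state machine with in-place mutation of the last emitted dict) by a pure cleaning pass producing (role, content) pairs followed by an itertools.groupby pass that collapses consecutive equal-role runs, joining only user/assistant runs with '\n\n'.
import Mathlib
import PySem

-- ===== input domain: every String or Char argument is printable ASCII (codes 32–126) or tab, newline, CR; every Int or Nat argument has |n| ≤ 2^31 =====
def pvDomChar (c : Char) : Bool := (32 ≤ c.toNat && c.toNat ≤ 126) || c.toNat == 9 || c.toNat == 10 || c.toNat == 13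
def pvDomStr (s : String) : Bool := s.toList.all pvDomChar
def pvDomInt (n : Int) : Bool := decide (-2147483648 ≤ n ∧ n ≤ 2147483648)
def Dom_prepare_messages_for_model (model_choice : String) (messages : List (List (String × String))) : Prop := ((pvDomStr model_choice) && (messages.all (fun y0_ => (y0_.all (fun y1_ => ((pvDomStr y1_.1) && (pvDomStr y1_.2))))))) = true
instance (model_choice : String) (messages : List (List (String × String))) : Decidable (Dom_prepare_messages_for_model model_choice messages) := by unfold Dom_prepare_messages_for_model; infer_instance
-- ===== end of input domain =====

-- B re-decomposes A's single stateful merge loop into a pure cleaning pass followed by a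
-- groupby-style run-collapsing pass (objective: alternative decomposition, same cost).
-- Equivalence is about the RETURN value; neither program mutates its arguments.

-- ===== PORT A =====
-- msg['role'] / msg['content'] : first-match lookup on the association list (KeyError = none, excluded by Pre_)
def pvRole (m : List (String × String)) : String := (List.lookup "role" m).getD ""
def pvContent (m : List (String × String)) : String := (List.lookup "content" m).getD ""
-- {'role': r, 'content': c}
def pvMk (r c : String) : List (String × String) := [("role", r), ("content", c)]
-- converted_messages[-1]['content'] += "\n\n" + content  (overwrite in place on A's own two-key dict)
def pvAddContent (m : List (String × String)) (c : String) : List (String × String) :=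
  m.map (fun kv => if kv.1 == "content" then (kv.1, kv.2 ++ "\n\n" ++ c) else kv)
-- one iteration of A's for-loop; state = (converted_messages, last_role)
def pvAStep (st : List (List (String × String)) × Option String) (msg : List (String × String)) :
    List (List (String × String)) × Option String :=
  let current_role := pvRole msg
  let content := pvContent msg
  if current_role == "system" then
    if st.1.isEmpty then (st.1 ++ [pvMk "user" content], some "user") else st
  else
    match st.2 with
    | none =>
      let conv := st.1 ++ [pvMk (if current_role == "user" then "user" else "assistant") content]
      (conv, some (pvRole (conv.getLast?.getD [])))
    | some last_role =>
      if (last_role == "user" && current_role == "user") ||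
         (last_role == "assistant" && current_role == "assistant") then
        let conv := st.1.dropLast ++ [pvAddContent (st.1.getLast?.getD []) content]
        (conv, some (pvRole (conv.getLast?.getD [])))
      else
        let conv := st.1 ++ [pvMk current_role content]
        (conv, some (pvRole (conv.getLast?.getD [])))

def prepare_messages_for_model (model_choice : String) (messages : List (List (String × String))) : List (List (String × String)) :=
  if model_choice == "Llama" then
    let conv := (messages.foldl pvAStep ([], none)).1
    if (!conv.isEmpty) && (pvRole (conv.getLast?.getD []) == "assistant") then conv.dropLast else conv
  else messages

-- ===== PORT B =====
-- pass 1 of Source B: cleaned list of (role, content)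
def pvCleanStep (cleaned : List (String × String)) (msg : List (String × String)) : List (String × String) :=
  let role := pvRole msg
  let content := pvContent msg
  if role == "system" then
    if cleaned.isEmpty then cleaned ++ [("user", content)] else cleaned
  else
    let r := if cleaned.isEmpty then (if role == "user" then "user" else "assistant") else role
    cleaned ++ [(r, content)]

-- itertools.groupby: take the contents of the leading run of role r, return (contents, remainder)
def pvTakeRun (r : String) : List (String × String) → List String × List (String × String)
  | [] => ([], [])
  | (a, c) :: rest =>
    if a == r then
      let p := pvTakeRun r rest
      (c :: p.1, p.2)
    else ([], (a, c) :: rest)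

theorem pvTakeRun_snd_length (r : String) (xs : List (String × String)) :
    (pvTakeRun r xs).2.length ≤ xs.length := by
  induction xs with
  | nil => simp [pvTakeRun]
  | cons h t ih =>
    obtain ⟨a, c⟩ := h
    simp only [pvTakeRun]
    split
    · simpa using Nat.le_succ_of_le ih
    · simp

-- pass 2 of Source B: the groupby loop over cleaned
def pvGroup : List (String × String) → List (List (String × String))
  | [] => []
  | (r, c) :: rest =>
    let p := pvTakeRun r rest
    if r == "user" || r == "assistant" then
      pvMk r (PySem.Str.join "\n\n" (c :: p.1)) :: pvGroup p.2
    else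
      (pvMk r c :: p.1.map (pvMk r)) ++ pvGroup p.2
termination_by xs => xs.length
decreasing_by
  all_goals exact Nat.lt_succ_of_le (pvTakeRun_snd_length r rest)

def prepare_messages_for_model_alt (model_choice : String) (messages : List (List (String × String))) : List (List (String × String)) :=
  if model_choice == "Llama" then
    let out := pvGroup (messages.foldl pvCleanStep [])
    if (!out.isEmpty) && (pvRole (out.getLast?.getD []) == "assistant") then out.dropLast else out
  else messages

-- ===== PRECONDITION & SPEC =====
-- Pre_ excludes exactly the inputs where Python A raises KeyError: for "Llama",
-- every message must carry both a 'role' and a 'content' key.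
def Pre_prepare_messages_for_model (model_choice : String) (messages : List (List (String × String))) : Prop :=
  model_choice = "Llama" →
    ∀ m ∈ messages, (List.lookup "role" m).isSome ∧ (List.lookup "content" m).isSome
instance (model_choice : String) (messages : List (List (String × String))) : Decidable (Pre_prepare_messages_for_model model_choice messages) := by unfold Pre_prepare_messages_for_model; infer_instance

def pvWitness_prepare_messages_for_model : String × (List (List (String × String))) :=
  ("Llama", [[("role", "system"), ("content", "be nice")],
             [("role", "user"), ("content", "hi")],
             [("role", "user"), ("content", "there")],
             [("role", "assistant"), ("content", "hello")]])

def Spec_prepare_messages_for_model (model_choice : String) (messages : List (List (String × String))) (out : List (List (String × String))) : Prop := out = prepare_messages_for_model_alt model_choice messages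
instance (model_choice : String) (messages : List (List (String × String))) (out : List (List (String × String))) : Decidable (Spec_prepare_messages_for_model model_choice messages out) := by unfold Spec_prepare_messages_for_model; infer_instance

-- ===== CLAIM (what is proved, stated in full; the proofs are below) =====
def Claim_equal_prepare_messages_for_model : Prop := ∀ (model_choice : String) (messages : List (List (String × String))), Dom_prepare_messages_for_model model_choice messages → Pre_prepare_messages_for_model model_choice messages → Spec_prepare_messages_for_model model_choice messages (prepare_messages_for_model model_choice messages)

-- ===== LEMMAS AND PROOFS =====

-- the non-system messages as (role, content) pairs, roles verbatim
def pvFilterClean (msgs : List (List (String × String))) : List (String × String) :=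
  msgs.filterMap (fun m => if pvRole m == "system" then none else some (pvRole m, pvContent m))

-- A's merge step once converted_messages is nonempty (derived from pvAStep)
def pvMerge (conv : List (List (String × String))) (p : String × String) : List (List (String × String)) :=
  let lr := pvRole (conv.getLast?.getD [])
  if (lr == "user" && p.1 == "user") || (lr == "assistant" && p.1 == "assistant") then
    conv.dropLast ++ [pvAddContent (conv.getLast?.getD []) p.2]
  else conv ++ [pvMk p.1 p.2]

-- grouping with an open run entry (role r, accumulated content c)
def pvGroupCont (r c : String) : List (String × String) → List (List (String × String))
  | [] => [pvMk r c]
  | (r', c') :: rest =>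
    if (r == "user" && r' == "user") || (r == "assistant" && r' == "assistant") then
      pvGroupCont r (c ++ "\n\n" ++ c') rest
    else pvMk r c :: pvGroupCont r' c' rest

theorem pvRole_mk (r c : String) : pvRole (pvMk r c) = r := by
  simp [pvRole, pvMk]

theorem pvAddContent_mk (r c c' : String) :
    pvAddContent (pvMk r c) c' = pvMk r (c ++ "\n\n" ++ c') := by
  simp [pvAddContent, pvMk]

-- A's loop, once the accumulator is nonempty, is pvMerge folded over the cleaned pairs
theorem pvA_fold_merge (msgs : List (List (String × String)))
    (conv : List (List (String × String))) (h : conv ≠ []) :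
    msgs.foldl pvAStep (conv, some (pvRole (conv.getLast?.getD []))) =
      ((pvFilterClean msgs).foldl pvMerge conv,
        some (pvRole (((pvFilterClean msgs).foldl pvMerge conv).getLast?.getD []))) := by
  induction msgs generalizing conv with
  | nil => simp [pvFilterClean]
  | cons m rest ih =>
    by_cases hs : pvRole m == "system"
    · have hne : conv.isEmpty = false := by simpa using h
      simp only [List.foldl_cons, pvAStep, hs, if_true, hne, if_false, Bool.false_eq_true,
        pvFilterClean, List.filterMap_cons]
      simpa [pvFilterClean] using ih conv h
    · have hstep : pvAStep (conv, some (pvRole (conv.getLast?.getD []))) m =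
          (pvMerge conv (pvRole m, pvContent m),
            some (pvRole ((pvMerge conv (pvRole m, pvContent m)).getLast?.getD []))) := by
        simp only [pvAStep, hs, if_false, Bool.false_eq_true, pvMerge]
        split <;> rfl
      have hne' : pvMerge conv (pvRole m, pvContent m) ≠ [] := by
        simp only [pvMerge]
        split <;> simp
      simp only [List.foldl_cons, hstep, pvFilterClean, List.filterMap_cons, hs, if_false,
        Bool.false_eq_true]
      simpa [pvFilterClean] using ih (pvMerge conv (pvRole m, pvContent m)) hne'

-- fold of pvMerge with a distinguished last entry = grouping with an open run
theorem pvMerge_fold_cont (pairs : List (String × String))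
    (pre : List (List (String × String))) (r c : String) :
    pairs.foldl pvMerge (pre ++ [pvMk r c]) = pre ++ pvGroupCont r c pairs := by
  induction pairs generalizing pre r c with
  | nil => simp [pvGroupCont]
  | cons p rest ih =>
    obtain ⟨r', c'⟩ := p
    have hlast : ((pre ++ [pvMk r c]).getLast?.getD []) = pvMk r c := by
      simp
    by_cases hm : ((r == "user" && r' == "user") || (r == "assistant" && r' == "assistant"))
    · have : pvMerge (pre ++ [pvMk r c]) (r', c') = pre ++ [pvMk r (c ++ "\n\n" ++ c')] := by
        simp only [pvMerge, hlast, pvRole_mk, hm, if_true, List.dropLast_concat, pvAddContent_mk]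
      simp only [List.foldl_cons, this, ih, pvGroupCont, hm, if_true]
    · have h2 : pvMerge (pre ++ [pvMk r c]) (r', c') = (pre ++ [pvMk r c]) ++ [pvMk r' c'] := by
        simp only [pvMerge, hlast, pvRole_mk, hm, Bool.false_eq_true, if_false]
      rw [List.foldl_cons, h2, ih (pre ++ [pvMk r c]) r' c']
      simp [pvGroupCont, hm]

-- joining strings: shifting an accumulated "\n\n" out of the head
theorem pvJoin_shift (a b : String) (cs : List String) :
    PySem.Str.join "\n\n" ((a ++ "\n\n" ++ b) :: cs) = a ++ "\n\n" ++ PySem.Str.join "\n\n" (b :: cs) := by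
  apply String.toList_inj.mp
  cases cs with
  | nil => simp [PySem.Str.toList_join, PySem.Chars.join_singleton]
  | cons d ds =>
    simp [PySem.Str.toList_join, PySem.Chars.join_cons_cons]

theorem pvJoin_singleton (c : String) : PySem.Str.join "\n\n" [c] = c := by
  apply String.toList_inj.mp
  simp [PySem.Str.toList_join, PySem.Chars.join_singleton]

theorem pvJoin_cons_cons (a b : String) (cs : List String) :
    PySem.Str.join "\n\n" (a :: b :: cs) = a ++ "\n\n" ++ PySem.Str.join "\n\n" (b :: cs) := by
  apply String.toList_inj.mp
  simp [PySem.Str.toList_join, PySem.Chars.join_cons_cons]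

-- the open-run grouping agrees with pvGroup on the full list
theorem pvGroupCont_eq_group (pairs : List (String × String)) (r c : String) :
    pvGroupCont r c pairs = pvGroup ((r, c) :: pairs) := by
  induction pairs generalizing r c with
  | nil => simp [pvGroupCont, pvGroup, pvTakeRun, pvJoin_singleton]
  | cons p rest ih =>
    obtain ⟨r', c'⟩ := p
    by_cases hm : ((r == "user" && r' == "user") || (r == "assistant" && r' == "assistant"))
    · -- merge: r = r' ∈ {user, assistant}
      have hrr' : (r' == r) = true := by
        rcases Bool.or_eq_true_iff.mp hm with h | h <;>
          · rcases Bool.and_eq_true_iff.mp h with ⟨h1, h2⟩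
            rw [eq_of_beq h1, eq_of_beq h2]
            decide
      have hua : (r == "user" || r == "assistant") = true := by
        rcases Bool.or_eq_true_iff.mp hm with h | h <;>
          simp [eq_of_beq (Bool.and_eq_true_iff.mp h).1]
      simp only [pvGroupCont, hm, if_true, ih, pvGroup, pvTakeRun, hrr', if_true, hua]
      rw [pvJoin_shift, pvJoin_cons_cons]
    · by_cases hrr' : r' == r
      · -- same role but not mergeable: r ∉ {user, assistant}
        have hr := eq_of_beq hrr'
        subst hr
        have hua : (r' == "user" || r' == "assistant") = false := by
          simp only [Bool.and_self] at hm
          simpa using hm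
        simp only [pvGroupCont, hm, Bool.false_eq_true, if_false, ih, pvGroup, pvTakeRun,
          BEq.rfl, if_true, hua, List.map_cons, List.cons_append]
      · -- run break
        have hrr'' : (r' == r) = false := by simpa using hrr'
        simp only [pvGroupCont, hm, Bool.false_eq_true, if_false, ih]
        by_cases hua : (r == "user" || r == "assistant") = true
        · simp [pvGroup, pvTakeRun, hrr'', hua, pvJoin_singleton]
        · simp [pvGroup, pvTakeRun, hrr'', hua]

-- Source B's cleaning loop, once cleaned is nonempty, appends the non-system pairs verbatim
theorem PvCleanTail (msgs : List (List (String × String))) (cleaned : List (String × String))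
    (h : cleaned ≠ []) :
    msgs.foldl pvCleanStep cleaned = cleaned ++ pvFilterClean msgs := by
  induction msgs generalizing cleaned with
  | nil => simp [pvFilterClean]
  | cons m rest ih =>
    have hne : cleaned.isEmpty = false := by simpa using h
    by_cases hs : pvRole m == "system"
    · simp only [List.foldl_cons, pvCleanStep, hs, if_true, hne, Bool.false_eq_true, if_false,
        pvFilterClean, List.filterMap_cons]
      simpa [pvFilterClean] using ih cleaned h
    · simp only [List.foldl_cons, pvCleanStep, hs, hne, Bool.false_eq_true, if_false,
        pvFilterClean, List.filterMap_cons]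
      rw [ih (cleaned ++ [(pvRole m, pvContent m)]) (by simp)]
      simp [pvFilterClean]

-- both accumulators after the whole input: A's converted_messages = B's grouped cleaned list
theorem pvConv_eq_group (msgs : List (List (String × String))) :
    (msgs.foldl pvAStep ([], none)).1 = pvGroup (msgs.foldl pvCleanStep []) := by
  cases msgs with
  | nil => simp [pvGroup]
  | cons m rest =>
    rw [List.foldl_cons, List.foldl_cons]
    by_cases hs : pvRole m == "system"
    · have hA : pvAStep ([], none) m =
          ([] ++ [pvMk "user" (pvContent m)],
           some (pvRole ((([] : List (List (String × String))) ++ [pvMk "user" (pvContent m)]).getLast?.getD []))) := by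
        simp [pvAStep, hs, pvRole_mk]
      have hB : pvCleanStep [] m = [("user", pvContent m)] := by
        simp [pvCleanStep, hs]
      rw [hA, hB, pvA_fold_merge rest ([] ++ [pvMk "user" (pvContent m)]) (by simp),
        PvCleanTail rest [("user", pvContent m)] (by simp)]
      have hM := pvMerge_fold_cont (pvFilterClean rest) [] "user" (pvContent m)
      simp only [List.nil_append, List.singleton_append] at hM ⊢
      rw [hM, pvGroupCont_eq_group]
    · have hA : pvAStep ([], none) m =
          ([] ++ [pvMk (if pvRole m == "user" then "user" else "assistant") (pvContent m)],
           some (pvRole ((([] : List (List (String × String))) ++ [pvMk (if pvRole m == "user" then "user" else "assistant") (pvContent m)]).getLast?.getD []))) := by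
        simp only [pvAStep, hs, Bool.false_eq_true, if_false]
      have hB : pvCleanStep [] m = [((if pvRole m == "user" then "user" else "assistant"), pvContent m)] := by
        simp [pvCleanStep, hs]
      rw [hA, hB, pvA_fold_merge rest ([] ++ [pvMk (if pvRole m == "user" then "user" else "assistant") (pvContent m)]) (by simp),
        PvCleanTail rest [((if pvRole m == "user" then "user" else "assistant"), pvContent m)] (by simp)]
      have hM := pvMerge_fold_cont (pvFilterClean rest) []
        (if pvRole m == "user" then "user" else "assistant") (pvContent m)
      simp only [List.nil_append, List.singleton_append] at hM ⊢
      rw [hM, pvGroupCont_eq_group]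

-- ===== VERDICT (by name: the statement is the Claim_ definition above) =====
theorem prepare_messages_for_model_spec : Claim_equal_prepare_messages_for_model := by
  intro mc msgs _ _
  unfold Spec_prepare_messages_for_model prepare_messages_for_model prepare_messages_for_model_alt
  by_cases h : mc == "Llama"
  · simp only [h, if_true, pvConv_eq_group msgs]
  · simp [h]
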